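-- pv_equiv track=rewrite | github.com/MayneKeen/db-labs | course_work/db_interface.py | format_products
-- ===== SOURCE A (Python) =====
-- def format_products(products):
--     products_str = ""
--     i = 0
--     for prod in products:
--         if i == 0:
--             products_str += "name: "
--             products_str += str(prod)
--             products_str += ' '
--             i += 1
--             continue
--         elif i == 1:
--             products_str += "price: "
--             products_str += str(prod)
--             products_str += ' '
--             products_str += '\n'
--             i = 0
--             continue
--
--     return products_str
-- ===== SOURCE B (Python) =====
-- def format_products(products):
--     parts = []
--     it = iter(products)
--     for prod in it:
--         parts.append("name: " + str(prod) + " ")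
--         for price in it:
--             parts.append("price: " + str(price) + " \n")
--             break
--     return "".join(parts)
-- ===== Notes on version B (the rewrite author's own statement) =====
-- stated objective: simpler
-- what changed: Replaces A's parity-toggle state machine with quadratic += string building by pairwise consumption of one iterator, appending fragments to a list joined once at the end.
import Mathlib
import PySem

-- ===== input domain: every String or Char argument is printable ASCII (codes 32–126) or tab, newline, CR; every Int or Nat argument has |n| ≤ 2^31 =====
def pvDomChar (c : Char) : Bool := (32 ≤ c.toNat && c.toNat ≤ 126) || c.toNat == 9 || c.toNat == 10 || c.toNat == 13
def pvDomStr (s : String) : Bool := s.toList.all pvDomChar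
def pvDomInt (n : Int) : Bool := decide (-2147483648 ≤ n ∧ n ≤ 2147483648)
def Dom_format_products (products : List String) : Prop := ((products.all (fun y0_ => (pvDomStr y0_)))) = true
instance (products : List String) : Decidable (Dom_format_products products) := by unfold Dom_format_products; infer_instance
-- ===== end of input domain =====

-- B replaces A's parity-toggle += state machine with pairwise consumption of one iterator, joining fragments at the end (simpler).

-- ===== PORT A =====
-- one iteration of A's for-loop body: state = (products_str, i)
def fpStep (st : String × Int) (prod : String) : String × Int :=
  if st.2 = 0 then (st.1 ++ "name: " ++ prod ++ " ", st.2 + 1)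
  else if st.2 = 1 then (st.1 ++ "price: " ++ prod ++ " " ++ "\n", 0)
  else st

def format_products (products : List String) : String :=
  (products.foldl fpStep ("", 0)).1

-- ===== PORT B =====
-- B's nested loop consumes the iterator pairwise: one name, then (if present) one price.
def fpAltGo : List String → List String
  | [] => []
  | [n] => ["name: " ++ n ++ " "]
  | n :: p :: rest => ("name: " ++ n ++ " ") :: ("price: " ++ p ++ " \n") :: fpAltGo rest

def format_products_alt (products : List String) : String :=
  String.join (fpAltGo products)

-- ===== PRECONDITION & SPEC =====
def Spec_format_products (products : List String) (out : String) : Prop := out = format_products_alt products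
instance (products : List String) (out : String) : Decidable (Spec_format_products products out) := by unfold Spec_format_products; infer_instance

-- ===== CLAIM (what is proved, stated in full; the proofs are below) =====
def Claim_equal_format_products : Prop := ∀ (products : List String), Dom_format_products products → Spec_format_products products (format_products products)

-- ===== LEMMAS AND PROOFS =====
theorem foldl_append_join (l : List String) (s : String) :
    List.foldl (fun r t => r ++ t) s l = s ++ String.join l := by
  induction l generalizing s with
  | nil => simp [String.join]
  | cons t l ih =>
      simp only [List.foldl, ih (s ++ t), String.join, String.append_assoc]
      rw [ih ("" ++ t), ih ""]; simp

theorem join_cons (s : String) (l : List String) :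
    String.join (s :: l) = s ++ String.join l := by
  simp only [String.join, List.foldl]
  simpa using foldl_append_join l ("" ++ s)

theorem sp_price : (" " : String) ++ "price: " = " price: " := by decide

theorem fp_key : ∀ (l : List String) (s : String),
    (l.foldl fpStep (s, 0)).1 = s ++ String.join (fpAltGo l) := by
  intro l
  induction l using fpAltGo.induct with
  | case1 => intro s; simp [fpAltGo, String.join]
  | case2 n => intro s; simp [fpAltGo, fpStep, String.join, String.append_assoc]
  | case3 n p rest ih =>
      intro s
      simp only [fpAltGo, List.foldl, fpStep, join_cons]
      simp [ih, String.append_assoc]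
      rw [← sp_price, String.append_assoc]

-- ===== VERDICT (by name: the statement is the Claim_ definition above) =====
theorem format_products_spec : Claim_equal_format_products := by
  intro products _
  unfold Spec_format_products format_products format_products_alt
  simpa using fp_key products ""
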